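-- pv_equiv track=rewrite | github.com/ninumt/PythonPractice | practicepy/Practice/TestGoogle.py | count_groups1
-- ===== SOURCE A (Python) =====
-- def count_groups1(numbers1):
--     count = 0
--     remaining_numbers = set(numbers1)
--
--     while remaining_numbers:
--         current_number = min(remaining_numbers)
--         consecutive_group = {current_number}
--         while current_number + 1 in remaining_numbers:
--             current_number += 1
--             consecutive_group.add(current_number)
--         remaining_numbers -= consecutive_group
--         count += 1
--
--     return count
-- ===== SOURCE B (Python) =====
-- def count_groups1(numbers1):
--     s = set(numbers1)
--     return sum(1 for x in s if x - 1 not in s)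
-- ===== Notes on version B (the rewrite author's own statement) =====
-- stated objective: faster
-- what changed: Instead of repeatedly taking the minimum of the remaining set and walking each consecutive run (quadratic), B counts in one pass the elements x of the set whose predecessor x-1 is absent, each of which starts exactly one run.
import Mathlib
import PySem

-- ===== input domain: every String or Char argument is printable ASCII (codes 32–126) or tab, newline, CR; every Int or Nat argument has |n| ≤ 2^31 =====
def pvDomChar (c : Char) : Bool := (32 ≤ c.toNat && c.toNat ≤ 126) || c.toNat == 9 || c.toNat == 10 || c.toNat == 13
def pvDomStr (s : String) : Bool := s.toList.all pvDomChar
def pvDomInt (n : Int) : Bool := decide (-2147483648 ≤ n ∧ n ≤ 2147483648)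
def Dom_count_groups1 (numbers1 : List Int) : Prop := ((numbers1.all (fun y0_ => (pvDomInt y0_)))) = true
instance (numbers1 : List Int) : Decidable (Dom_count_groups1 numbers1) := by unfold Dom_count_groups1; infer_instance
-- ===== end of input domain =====

-- B replaces A's quadratic min-and-walk loop over the remaining set by a single
-- pass counting the elements x with x - 1 not in the set (each starts one run).

-- Two counting lemmas cited by the ports' termination proofs.
theorem pvCountP_strict {l : List Int} {a : Int} (p q : Int → Bool)
    (ha : a ∈ l) (hpq : ∀ x, p x = true → q x = true)
    (hpa : p a = false) (hqa : q a = true) :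
    l.countP p < l.countP q := by
  induction l with
  | nil => cases ha
  | cons x t ih =>
    rcases List.mem_cons.mp ha with rfl | hat
    · have hmono : t.countP p ≤ t.countP q := List.countP_mono_left (fun x _ => hpq x)
      simp [hpa, hqa]; omega
    · have := ih hat
      by_cases hp : p x = true
      · simp [hp, hpq x hp]; omega
      · simp only [Bool.not_eq_true] at hp
        by_cases hq : q x = true <;> simp [hp, hq] <;> omega

theorem pvFilter_length_lt {l : List Int} {a : Int} (p : Int → Bool)
    (ha : a ∈ l) (hpa : p a = false) :
    (l.filter p).length < l.length := by
  have := pvCountP_strict p (fun _ => true) ha (fun _ _ => rfl) hpa rfl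
  simpa [← List.countP_eq_length_filter, List.countP_true] using this

-- ===== PORT A =====
-- inner 'while current_number + 1 in remaining_numbers' loop: extends the group
def pvInnerA (remaining : List Int) (cur : Int) (grp : PySem.Set Int) : PySem.Set Int :=
  if (cur + 1) ∈ remaining then
    pvInnerA remaining (cur + 1) (PySem.Set.add grp (cur + 1))
  else grp
termination_by remaining.countP (fun y => decide (cur < y))
decreasing_by
  rename_i h
  exact pvCountP_strict (fun y => decide (cur + 1 < y)) (fun y => decide (cur < y)) h
    (by intro x hx; simp at hx ⊢; omega) (by simp) (by simp)

-- used by pvOuterA's termination proof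
theorem pvInnerA_mem_of_mem (r : List Int) (x : Int) :
    ∀ (cur : Int) (grp : PySem.Set Int), x ∈ grp → x ∈ pvInnerA r cur grp := by
  intro cur grp
  induction cur, grp using pvInnerA.induct (remaining := r) with
  | case1 cur grp h ih =>
    intro hx
    rw [pvInnerA, if_pos h]
    exact ih (by rw [PySem.Set.mem_add]; exact Or.inl hx)
  | case2 cur grp h =>
    intro hx
    rw [pvInnerA, if_neg h]
    exact hx

-- outer 'while remaining_numbers' loop
def pvOuterA (remaining : PySem.Set Int) (count : Int) : Int :=
  if remaining = [] then count
  else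
    let current := (PySem.List.min? remaining (fun x => x)).getD 0
    let grp := pvInnerA remaining current (PySem.Set.add PySem.Set.empty current)
    pvOuterA (PySem.Set.diff remaining grp) (count + 1)
termination_by remaining.length
decreasing_by
  rename_i h
  have hne : remaining ≠ [] := h
  obtain ⟨m, hm⟩ : ∃ m, PySem.List.min? remaining (fun x => x) = some m := by
    cases hmin : PySem.List.min? remaining (fun x => x) with
    | none => exact absurd ((PySem.List.min?_eq_none_iff _ _).mp hmin) hne
    | some m => exact ⟨m, rfl⟩
  have hmem : m ∈ remaining := PySem.List.min?_mem hm
  have hmgrp : m ∈ pvInnerA remaining ((PySem.List.min? remaining (fun x => x)).getD 0)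
      (PySem.Set.add PySem.Set.empty ((PySem.List.min? remaining (fun x => x)).getD 0)) := by
    rw [hm]
    exact pvInnerA_mem_of_mem remaining m m _ (by simp [PySem.Set.add, PySem.Set.empty])
  exact pvFilter_length_lt _ hmem (by simpa using hmgrp)

def count_groups1 (numbers1 : List Int) : Int :=
  pvOuterA (PySem.Set.ofList numbers1) 0

-- ===== PORT B =====
def count_groups1_alt (numbers1 : List Int) : Int :=
  let s := PySem.Set.ofList numbers1
  s.foldl (fun acc x => if (x - 1) ∈ s then acc else acc + 1) 0

-- ===== PRECONDITION & SPEC =====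
def Spec_count_groups1 (numbers1 : List Int) (out : Int) : Prop := out = count_groups1_alt numbers1
instance (numbers1 : List Int) (out : Int) : Decidable (Spec_count_groups1 numbers1 out) := by unfold Spec_count_groups1; infer_instance

-- ===== CLAIM (what is proved, stated in full; the proofs are below) =====
def Claim_equal_count_groups1 : Prop := ∀ (numbers1 : List Int), Dom_count_groups1 numbers1 → Spec_count_groups1 numbers1 (count_groups1 numbers1)

-- ===== LEMMAS AND PROOFS =====

-- the top of the consecutive run starting at cur
def pvReach (r : List Int) (cur : Int) : Int :=
  if (cur + 1) ∈ r then pvReach r (cur + 1) else cur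
termination_by r.countP (fun y => decide (cur < y))
decreasing_by
  rename_i h
  exact pvCountP_strict (fun y => decide (cur + 1 < y)) (fun y => decide (cur < y)) h
    (by intro x hx; simp at hx ⊢; omega) (by simp) (by simp)

theorem pvReach_le (r : List Int) (cur : Int) : cur ≤ pvReach r cur := by
  induction cur using pvReach.induct (r := r) with
  | case1 cur h ih => rw [pvReach, if_pos h]; omega
  | case2 cur h => rw [pvReach, if_neg h]

theorem pvReach_succ_notMem (r : List Int) (cur : Int) : pvReach r cur + 1 ∉ r := by
  induction cur using pvReach.induct (r := r) with
  | case1 cur h ih => rw [pvReach, if_pos h]; exact ih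
  | case2 cur h => rw [pvReach, if_neg h]; exact h

theorem pvReach_mem (r : List Int) (cur : Int) :
    ∀ x, cur < x → x ≤ pvReach r cur → x ∈ r := by
  induction cur using pvReach.induct (r := r) with
  | case1 cur h ih =>
    intro x h1 h2
    rw [pvReach, if_pos h] at h2
    rcases eq_or_lt_of_le (by omega : cur + 1 ≤ x) with rfl | hlt
    · exact h
    · exact ih x hlt h2
  | case2 cur h =>
    intro x h1 h2
    rw [pvReach, if_neg h] at h2; omega

theorem pvInnerA_mem (r : List Int) (cur : Int) (grp : PySem.Set Int) (x : Int) :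
    x ∈ pvInnerA r cur grp ↔ x ∈ grp ∨ (cur < x ∧ x ≤ pvReach r cur) := by
  induction cur, grp using pvInnerA.induct (remaining := r) with
  | case1 cur grp h ih =>
    rw [pvInnerA, if_pos h, pvReach, if_pos h, ih, PySem.Set.mem_add]
    have := pvReach_le r (cur + 1)
    constructor
    · rintro ((hg | rfl) | ⟨h1, h2⟩)
      · exact Or.inl hg
      · exact Or.inr ⟨by omega, by omega⟩
      · exact Or.inr ⟨by omega, h2⟩
    · rintro (hg | ⟨h1, h2⟩)
      · exact Or.inl (Or.inl hg)
      · rcases eq_or_lt_of_le (by omega : cur + 1 ≤ x) with rfl | hlt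
        · exact Or.inl (Or.inr rfl)
        · exact Or.inr ⟨hlt, h2⟩
  | case2 cur grp h =>
    rw [pvInnerA, if_neg h, pvReach, if_neg h]
    constructor
    · exact Or.inl
    · rintro (hg | ⟨h1, h2⟩)
      · exact hg
      · omega

-- number of run starts of a set (as a list of distinct elements)
def pvStarts (s : List Int) : Nat := s.countP (fun x => decide ((x - 1) ∉ s))

theorem pvCountP_split (p q : Int → Bool) (l : List Int) :
    l.countP p = l.countP (fun x => p x && q x) + l.countP (fun x => p x && !q x) := by
  induction l with
  | nil => simp
  | cons x t ih =>
    by_cases hp : p x = true <;> by_cases hq : q x = true <;>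
      simp [hp, hq] <;> omega

theorem pvCountP_one {l : List Int} {m : Int} (p : Int → Bool)
    (hnd : l.Nodup) (hm : m ∈ l) (hp : ∀ x ∈ l, p x = true ↔ x = m) :
    l.countP p = 1 := by
  have h1 : l.countP p = l.countP (fun x => x == m) := by
    refine List.countP_congr (fun x hx => ?_)
    simp [hp x hx]
  rw [h1]
  have : l.count m = 1 := List.count_eq_one_of_mem hnd hm
  simpa [List.count] using this

theorem pvOuterA_eq (n : Nat) : ∀ (R : List Int), R.length ≤ n → R.Nodup →
    ∀ (c : Int), pvOuterA R c = c + (pvStarts R : Int) := by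
  induction n with
  | zero =>
    intro R hlen _ c
    have : R = [] := List.eq_nil_of_length_eq_zero (by omega)
    subst this
    rw [pvOuterA]; simp [pvStarts]
  | succ n ih =>
    intro R hlen hnd c
    by_cases hR : R = []
    · subst hR; rw [pvOuterA]; simp [pvStarts]
    · obtain ⟨m, hm⟩ : ∃ m, PySem.List.min? R (fun x => x) = some m := by
        cases hmin : PySem.List.min? R (fun x => x) with
        | none => exact absurd ((PySem.List.min?_eq_none_iff _ _).mp hmin) hR
        | some m => exact ⟨m, rfl⟩
      have hmem : m ∈ R := PySem.List.min?_mem hm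
      have hmin : ∀ y ∈ R, m ≤ y := PySem.List.min?_isMin hm
      set t := pvReach R m with ht
      have ht1 : m ≤ t := pvReach_le R m
      have ht2 : t + 1 ∉ R := pvReach_succ_notMem R m
      have ht3 : ∀ x, m < x → x ≤ t → x ∈ R := pvReach_mem R m
      have hbase : PySem.Set.add PySem.Set.empty m = [m] := by
        simp [PySem.Set.add, PySem.Set.empty]
      have hgrp : ∀ x, x ∈ pvInnerA R m (PySem.Set.add PySem.Set.empty m) ↔ m ≤ x ∧ x ≤ t := by
        intro x
        rw [pvInnerA_mem, hbase]
        simp only [List.mem_singleton, ← ht]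
        constructor
        · rintro (rfl | ⟨h1, h2⟩)
          · exact ⟨le_refl _, ht1⟩
          · exact ⟨by omega, h2⟩
        · rintro ⟨h1, h2⟩
          by_cases hxm : x = m
          · exact Or.inl hxm
          · exact Or.inr ⟨lt_of_le_of_ne h1 (Ne.symm hxm), h2⟩
      set grp := pvInnerA R m (PySem.Set.add PySem.Set.empty m) with hgrpdef
      set R' := PySem.Set.diff R grp with hR'def
      have hR' : ∀ x, x ∈ R' ↔ x ∈ R ∧ t < x := by
        intro x
        rw [hR'def, PySem.Set.mem_diff]
        constructor
        · rintro ⟨hx, hng⟩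
          refine ⟨hx, ?_⟩
          have := hmin x hx
          by_contra hle
          exact hng ((hgrp x).mpr ⟨this, by omega⟩)
        · rintro ⟨hx, hgt⟩
          exact ⟨hx, fun hg => by have := ((hgrp x).mp hg).2; omega⟩
      have hnd' : R'.Nodup := PySem.Set.nodup_diff R grp hnd
      have hlen' : R'.length < R.length := by
        have hmnotR' : m ∉ R' := fun h => by have := (hR' m).mp h; omega
        rw [hR'def]
        exact pvFilter_length_lt _ hmem
          (by simp; exact (hgrp m).mpr ⟨le_refl _, ht1⟩)
      have hcount : pvStarts R = pvStarts R' + 1 := by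
        have hsplit := pvCountP_split (fun x => decide ((x - 1) ∉ R)) (fun x => decide (x ≤ t)) R
        have hA1 : R.countP (fun x => decide ((x - 1) ∉ R) && decide (x ≤ t)) = 1 := by
          refine pvCountP_one _ hnd hmem (fun x hx => ?_)
          simp only [Bool.and_eq_true, decide_eq_true_eq]
          constructor
          · rintro ⟨hnm, hle⟩
            by_contra hne
            have hmx := hmin x hx
            have hmlt : m < x := lt_of_le_of_ne hmx (Ne.symm hne)
            apply hnm
            rcases eq_or_lt_of_le (by omega : m ≤ x - 1) with heq | hlt
            · rw [← heq]; exact hmem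
            · exact ht3 (x - 1) hlt (by omega)
          · intro hxe
            exact ⟨fun hin => by have := hmin (x - 1) hin; omega, by omega⟩
        have hA2 : R.countP (fun x => decide ((x - 1) ∉ R) && !decide (x ≤ t))
            = R'.countP (fun x => decide ((x - 1) ∉ R')) := by
          show R.countP _
            = (R.filter (fun x => !(PySem.Set.contains grp x))).countP
                (fun x => decide ((x - 1) ∉ R'))
          rw [List.countP_filter]
          refine List.countP_congr (fun x hx => ?_)
          have hmx := hmin x hx
          by_cases hxt : t < x
          · have hxng : x ∉ grp := fun hg => absurd ((hgrp x).mp hg).2 (by omega)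
            have hx1 : (x - 1 ∈ R') ↔ (x - 1 ∈ R) := by
              constructor
              · exact fun h => ((hR' _).mp h).1
              · intro h
                refine (hR' _).mpr ⟨h, ?_⟩
                have hne : x ≠ t + 1 := fun he => ht2 (he ▸ hx)
                omega
            have h1 : ¬ (x ≤ t) := by omega
            have hcx : PySem.Set.contains grp x = false := by
              rw [← Bool.not_eq_true, PySem.Set.contains_iff]; exact hxng
            have hd : decide ((x - 1) ∉ R') = decide ((x - 1) ∉ R) :=
              decide_eq_decide.mpr (not_congr hx1)
            have hdt : decide (x ≤ t) = false := decide_eq_false h1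
            rw [hd, hcx, hdt]
          · have hxg : x ∈ grp := (hgrp x).mpr ⟨hmx, by omega⟩
            have hcx : PySem.Set.contains grp x = true := by
              rw [PySem.Set.contains_iff]; exact hxg
            have hdt : decide (x ≤ t) = true := decide_eq_true (by omega)
            rw [hcx, hdt]
            simp
        simp only [pvStarts]
        omega
      have hstep : pvOuterA R c = pvOuterA R' (c + 1) := by
        rw [pvOuterA, if_neg hR]
        simp only [hm, Option.getD_some]
        rfl
      rw [hstep, ih R' (by omega) hnd' (c + 1), hcount]
      push_cast; ring

theorem pvAlt_foldl (s : List Int) : ∀ (l : List Int) (acc : Int),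
    l.foldl (fun acc x => if (x - 1) ∈ s then acc else acc + 1) acc
      = acc + (l.countP (fun x => decide ((x - 1) ∉ s)) : Int) := by
  intro l
  induction l with
  | nil => simp
  | cons x tl ih =>
    intro acc
    by_cases hx : (x - 1) ∈ s <;> simp [hx, ih] <;> ring

-- ===== VERDICT (by name: the statement is the Claim_ definition above) =====
theorem count_groups1_spec : Claim_equal_count_groups1 := by
  intro numbers1 _
  unfold Spec_count_groups1 count_groups1 count_groups1_alt
  rw [pvOuterA_eq (PySem.Set.ofList numbers1).length _ (le_refl _) (PySem.Set.nodup_ofList numbers1) 0,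
    pvAlt_foldl]
  simp [pvStarts]
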